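-- pv_equiv track=rewrite | github.com/Shrekulka/educationalProjects | python/scraper/requests_and_beautiful_soup/lego_scraper/src/thread_scraper/extractors.py | extract_toy_info
-- ===== SOURCE A (Python) =====
-- from typing import List, Dict, Tuple, Optional
--
-- def extract_toy_info(toy_attributes: List[str]) -> Dict[str, Optional[str]]:
--     """
--     Извлекает информацию о toy (игрушке) из списка атрибутов и возвращает словарь с данными об игрушке.
--
--     Функция принимает список строк, представляющих атрибуты игрушки, и классифицирует их по типам:
--     возраст, количество деталей и рейтинг. Возвращает словарь, содержащий соответствующие значения
--     для каждого типа атрибута. Если атрибут не найден, возвращает None.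
--
--     Args:
--         toy_attributes (List[str]): Список строк, содержащих атрибуты игрушки.
--                                     Например, ['3+', '200 pieces', '4.5'].
--
--     Returns:
--         Dict[str, Optional[str]]: Словарь с ключами 'age', 'pieces', 'rating', где значения могут быть строками
--                                    или None, если соответствующий атрибут не найден.
--     """
--     # Инициализируем словарь для хранения данных об игрушке
--     toy_data = {'age': None, 'pieces': None, 'rating': None}
--
--     # Проходим по каждому атрибуту в списке
--     for attr in toy_attributes:
--         # Если атрибут содержит знак '+', предполагаем, что это возраст
--         if '+' in attr:
--             toy_data['age'] = attr
--         # Если атрибут содержит точку, предполагаем, что это рейтинг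
--         elif '.' in attr:
--             toy_data['rating'] = attr
--         # Если атрибут не содержит ни '+' ни '.', предполагаем, что это количество деталей
--         else:
--             toy_data['pieces'] = attr
--
--     # Возвращаем словарь с извлеченными данными
--     return toy_data
-- ===== SOURCE B (Python) =====
-- def extract_toy_info(toy_attributes):
--     """Three independent reverse scans, one per field (last-write-wins by construction)."""
--     age = next((a for a in reversed(toy_attributes) if '+' in a), None)
--     rating = next((a for a in reversed(toy_attributes) if '.' in a and '+' not in a), None)
--     pieces = next((a for a in reversed(toy_attributes) if '+' not in a and '.' not in a), None)
--     return {'age': age, 'pieces': pieces, 'rating': rating}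
-- ===== Notes on version B (the rewrite author's own statement) =====
-- stated objective: alternative
-- what changed: Replaces the single classifying loop with last-write-wins dict mutation by three independent reverse scans (next over reversed), one per output field, assembling the dict once.
import Mathlib
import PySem

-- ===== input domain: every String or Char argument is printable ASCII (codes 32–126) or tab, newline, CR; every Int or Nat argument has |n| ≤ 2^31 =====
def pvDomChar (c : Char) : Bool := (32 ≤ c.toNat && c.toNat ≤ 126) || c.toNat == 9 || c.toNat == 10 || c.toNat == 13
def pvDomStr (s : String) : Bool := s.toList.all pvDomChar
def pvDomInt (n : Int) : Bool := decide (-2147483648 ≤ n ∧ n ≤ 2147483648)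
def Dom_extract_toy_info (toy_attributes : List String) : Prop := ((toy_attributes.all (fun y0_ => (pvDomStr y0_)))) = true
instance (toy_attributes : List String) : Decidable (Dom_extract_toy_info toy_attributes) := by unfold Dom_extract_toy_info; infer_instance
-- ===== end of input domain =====

-- B replaces A's single classifying loop by three independent reverse scans, one per field (objective: alternative).

-- ===== PORT A =====
-- A: one loop over the attributes, overwriting the matching key of a 3-key dict.
def extract_toy_info (toy_attributes : List String) : List (String × Option String) :=
  let toy_data : PySem.Dict String (Option String) :=
    PySem.Dict.ofList [("age", none), ("pieces", none), ("rating", none)]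
  (toy_attributes.foldl (fun d attr =>
    if PySem.Str.isIn "+" attr then d.insert "age" (some attr)
    else if PySem.Str.isIn "." attr then d.insert "rating" (some attr)
    else d.insert "pieces" (some attr)) toy_data).items

-- ===== PORT B =====
-- B: three independent reverse scans (next over reversed), one per field.
def extract_toy_info_alt (toy_attributes : List String) : List (String × Option String) :=
  let age := toy_attributes.reverse.find? (fun a => PySem.Str.isIn "+" a)
  let rating := toy_attributes.reverse.find? (fun a => PySem.Str.isIn "." a && !PySem.Str.isIn "+" a)
  let pieces := toy_attributes.reverse.find? (fun a => !PySem.Str.isIn "+" a && !PySem.Str.isIn "." a)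
  [("age", age), ("pieces", pieces), ("rating", rating)]

-- ===== PRECONDITION & SPEC =====
def Spec_extract_toy_info (toy_attributes : List String) (out : List (String × Option String)) : Prop := out = extract_toy_info_alt toy_attributes
instance (toy_attributes : List String) (out : List (String × Option String)) : Decidable (Spec_extract_toy_info toy_attributes out) := by unfold Spec_extract_toy_info; infer_instance

-- ===== CLAIM (what is proved, stated in full; the proofs are below) =====
def Claim_equal_extract_toy_info : Prop := ∀ (toy_attributes : List String), Dom_extract_toy_info toy_attributes → Spec_extract_toy_info toy_attributes (extract_toy_info toy_attributes)

-- ===== LEMMAS AND PROOFS =====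

-- Invariant: folding A's step from any 3-key dict state yields, per key, the last match in the
-- remaining list (first in its reverse), falling back to the incoming state.
theorem extract_toy_info_fold_inv (xs : List String) (a p r : Option String) :
    ((xs.foldl (fun d attr =>
        if PySem.Str.isIn "+" attr then d.insert "age" (some attr)
        else if PySem.Str.isIn "." attr then d.insert "rating" (some attr)
        else d.insert "pieces" (some attr))
      (PySem.Dict.ofList [("age", a), ("pieces", p), ("rating", r)])).items) =
    [("age", (xs.reverse.find? (fun s => PySem.Str.isIn "+" s)).or a),
     ("pieces", (xs.reverse.find? (fun s => !PySem.Str.isIn "+" s && !PySem.Str.isIn "." s)).or p),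
     ("rating", (xs.reverse.find? (fun s => PySem.Str.isIn "." s && !PySem.Str.isIn "+" s)).or r)] := by
  induction xs generalizing a p r with
  | nil => rfl
  | cons x xs ih =>
    rw [List.foldl_cons, List.reverse_cons]
    by_cases hp : PySem.Str.isIn "+" x
    · have hp' : PySem.Chars.isIn ['+'] x.toList = true := by simpa using hp
      rw [if_pos hp]
      refine (ih (some x) p r).trans ?_
      simp [List.find?_append, hp']
    · have hp' : PySem.Chars.isIn ['+'] x.toList = false := by simpa using hp
      rw [if_neg hp]
      by_cases hd : PySem.Str.isIn "." x
      · have hd' : PySem.Chars.isIn ['.'] x.toList = true := by simpa using hd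
        rw [if_pos hd]
        refine (ih a p (some x)).trans ?_
        simp [List.find?_append, hp', hd']
      · have hd' : PySem.Chars.isIn ['.'] x.toList = false := by simpa using hd
        rw [if_neg hd]
        refine (ih a (some x) r).trans ?_
        simp [List.find?_append, hp', hd']

-- ===== VERDICT (by name: the statement is the Claim_ definition above) =====
theorem extract_toy_info_spec : Claim_equal_extract_toy_info := by
  intro xs _
  show extract_toy_info xs = extract_toy_info_alt xs
  unfold extract_toy_info extract_toy_info_alt
  rw [extract_toy_info_fold_inv]
  simp
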